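-- pv_equiv track=rewrite | github.com/SLACKHA/pyJac | pyjac/kernel_utils/file_writers.py | preamble_filter
-- ===== SOURCE A (Python) =====
-- def preamble_filter(lines):
--     #check things outside of function definitions for duplicated lines
--     #first, find the kernel text
--
--     seen = set()
--     out_lines = []
--     in_preamble = True
--     brace_counter = 0
--     for line in lines:
--         if 'void' in line:
--             in_preamble = False
--             assert brace_counter == 0
--
--         if in_preamble:
--             #check for dupes
--             if line not in seen or not line.strip():
--                 seen.add(line)
--                 out_lines.append(line)
--         else:
--             out_lines.append(line)
--
--         #update braces
--         if not in_preamble and '{' in line: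
--             brace_counter += 1
--         if not in_preamble and '}' in line:
--             brace_counter -= 1
--             if brace_counter == 0:
--                 in_preamble = True
--
--     return out_lines
-- ===== SOURCE B (Python) =====
-- def preamble_filter(lines):
--     lines = list(lines)
--     # pass 1: flag each line: True = outside any function body (preamble)
--     flags = []
--     in_preamble = True
--     brace_counter = 0
--     for line in lines:
--         if 'void' in line:
--             in_preamble = False
--             assert brace_counter == 0
--         flags.append(in_preamble)
--         if not in_preamble and '{' in line:
--             brace_counter += 1
--         if not in_preamble and '}' in line:
--             brace_counter -= 1
--             if brace_counter == 0:
--                 in_preamble = True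
--     # pass 2: map each preamble content to the index of its first preamble
--     # occurrence; keep body lines, blank preamble lines, and first occurrences
--     first = {}
--     for i, line in enumerate(lines):
--         if flags[i] and line not in first:
--             first[line] = i
--     return [line for i, line in enumerate(lines)
--             if not flags[i] or not line.strip() or first[line] == i]
-- ===== Notes on version B (the rewrite author's own statement) =====
-- stated objective: alternative
-- what changed: A's single fused loop (seen-set dedup interleaved with the brace state machine) is split into a flag pass producing per-line preamble flags, a first-occurrence index map, and a comprehension keeping body lines, blank lines and first preamble occurrences.
import Mathlib
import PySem

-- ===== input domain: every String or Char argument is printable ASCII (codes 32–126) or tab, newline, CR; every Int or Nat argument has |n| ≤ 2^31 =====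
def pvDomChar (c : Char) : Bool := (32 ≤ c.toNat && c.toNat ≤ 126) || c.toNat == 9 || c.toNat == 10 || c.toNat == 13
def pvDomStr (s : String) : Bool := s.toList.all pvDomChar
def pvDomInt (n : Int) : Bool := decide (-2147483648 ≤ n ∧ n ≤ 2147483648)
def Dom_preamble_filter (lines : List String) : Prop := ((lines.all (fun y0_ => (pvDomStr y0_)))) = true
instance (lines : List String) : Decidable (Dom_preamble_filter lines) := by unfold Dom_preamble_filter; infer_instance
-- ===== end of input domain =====

-- B replaces A's fused dedup loop by two passes: a flag pass (preamble/body per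
-- line) and a first-occurrence index map driving a comprehension (objective:
-- alternative decomposition, same cost).

-- ===== PORT A =====
-- A's single loop over lines with state (seen, out_lines, in_preamble, brace_counter).
-- The 'assert brace_counter == 0' raises exactly on inputs excluded by Pre_ below;
-- the port's return value ignores it.
def pfLoopA (seen : PySem.Set String) (out : List String) (inPre : Bool) (brace : Int) :
    List String → List String
  | [] => out
  | line :: rest =>
    let inPre := if PySem.Str.isIn "void" line then false else inPre
    -- assert brace_counter == 0  (see Pre_preamble_filter)
    let so : PySem.Set String × List String :=
      if inPre then
        if !(PySem.Set.contains seen line) || PySem.Str.strip line == "" then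
          (PySem.Set.add seen line, out ++ [line])
        else (seen, out)
      else (seen, out ++ [line])
    let brace := if !inPre && PySem.Str.isIn "{" line then brace + 1 else brace
    let bi : Int × Bool :=
      if !inPre && PySem.Str.isIn "}" line then
        (brace - 1, if brace - 1 = 0 then true else inPre)
      else (brace, inPre)
    pfLoopA so.1 so.2 bi.2 bi.1 rest

def preamble_filter (lines : List String) : List String :=
  pfLoopA PySem.Set.empty [] true 0 lines

-- ===== PORT B =====
-- pass 1: per-line preamble flag (the same brace state machine, producing flags only)
def pfFlags (inPre : Bool) (brace : Int) : List String → List Bool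
  | [] => []
  | line :: rest =>
    let inPre := if PySem.Str.isIn "void" line then false else inPre
    -- assert brace_counter == 0  (see Pre_preamble_filter)
    let brace := if !inPre && PySem.Str.isIn "{" line then brace + 1 else brace
    let bi : Int × Bool :=
      if !inPre && PySem.Str.isIn "}" line then
        (brace - 1, if brace - 1 = 0 then true else inPre)
      else (brace, inPre)
    inPre :: pfFlags bi.2 bi.1 rest

-- pass 2a: first[line] = index of the first preamble occurrence of that content
def pfFirst (i : Int) (first : PySem.Dict String Int) :
    List (String × Bool) → PySem.Dict String Int
  | [] => first
  | (line, flag) :: rest =>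
    let first := if flag && !(first.contains line) then first.insert line i else first
    pfFirst (i + 1) first rest

-- pass 2b: the comprehension — keep body lines, blank preamble lines, first occurrences
-- (the getD default -1 is unreachable: every preamble line is a key of `first`)
def pfSelect (first : PySem.Dict String Int) (i : Int) :
    List (String × Bool) → List String
  | [] => []
  | (line, flag) :: rest =>
    if !flag || PySem.Str.strip line == "" || first.getD line (-1) == i then
      line :: pfSelect first (i + 1) rest
    else
      pfSelect first (i + 1) rest

def preamble_filter_alt (lines : List String) : List String :=
  let pairs := lines.zip (pfFlags true 0 lines)
  pfSelect (pfFirst 0 PySem.Dict.empty pairs) 0 pairs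

-- ===== PRECONDITION & SPEC =====
-- Pre_ excludes exactly the inputs on which A's 'assert brace_counter == 0' raises
-- AssertionError: a line containing 'void' reached while the running brace balance of
-- the body lines so far is non-zero.  (B raises there too; nothing is claimed there.)
def pfOk (inPre : Bool) (brace : Int) : List String → Bool
  | [] => true
  | line :: rest =>
    if PySem.Str.isIn "void" line && !(brace == 0) then false
    else
      let inPre := if PySem.Str.isIn "void" line then false else inPre
      let brace := if !inPre && PySem.Str.isIn "{" line then brace + 1 else brace
      let bi : Int × Bool :=
        if !inPre && PySem.Str.isIn "}" line then
          (brace - 1, if brace - 1 = 0 then true else inPre)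
        else (brace, inPre)
      pfOk bi.2 bi.1 rest

def Pre_preamble_filter (lines : List String) : Prop := pfOk true 0 lines = true
instance (lines : List String) : Decidable (Pre_preamble_filter lines) := by
  unfold Pre_preamble_filter; infer_instance

def pvWitness_preamble_filter : List String :=
  ["#include <a>", "#include <a>", "", "void f() {", "x = 1;", "}"]

def Spec_preamble_filter (lines : List String) (out : List String) : Prop :=
  out = preamble_filter_alt lines
instance (lines : List String) (out : List String) : Decidable (Spec_preamble_filter lines out) := by
  unfold Spec_preamble_filter; infer_instance

-- ===== CLAIM (what is proved, stated in full; the proofs are below) =====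
def Claim_equal_preamble_filter : Prop :=
  ∀ (lines : List String), Dom_preamble_filter lines → Pre_preamble_filter lines →
    Spec_preamble_filter lines (preamble_filter lines)

-- ===== LEMMAS AND PROOFS =====

-- proof-side intermediate: A's dedup decision run over (line, flag) pairs with a seen set
def pfDedup (seen : PySem.Set String) : List (String × Bool) → List String
  | [] => []
  | (line, flag) :: rest =>
    if flag then
      if !(PySem.Set.contains seen line) || PySem.Str.strip line == "" then
        line :: pfDedup (PySem.Set.add seen line) rest
      else pfDedup seen rest
    else line :: pfDedup seen rest

-- fission: A's fused loop = flag pass + seen-set dedup pass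
theorem pfLoopA_eq_dedup (lines : List String) :
    ∀ (seen : PySem.Set String) (out : List String) (inPre : Bool) (brace : Int),
      pfLoopA seen out inPre brace lines =
        out ++ pfDedup seen (lines.zip (pfFlags inPre brace lines)) := by
  induction lines with
  | nil => intro seen out inPre brace; simp [pfLoopA, pfFlags, pfDedup]
  | cons line rest ih =>
    intro seen out inPre brace
    simp only [pfLoopA, pfFlags, List.zip_cons_cons, pfDedup]
    by_cases hv : PySem.Str.isIn "void" line = true <;>
      by_cases hp : inPre = true <;>
        simp [hp, ih, List.append_assoc] <;> split_ifs <;>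
          simp [List.append_assoc]

-- pfFirst never touches keys already present
theorem pfFirst_get?_of_contains (pairs : List (String × Bool)) :
    ∀ (i : Int) (d : PySem.Dict String Int) (l : String), d.contains l = true →
      (pfFirst i d pairs).get? l = d.get? l := by
  induction pairs with
  | nil => intro i d l h; rfl
  | cons p rest ih =>
    intro i d l h
    obtain ⟨line, flag⟩ := p
    simp only [pfFirst]
    by_cases hc : d.contains line = true
    · simp only [hc, Bool.not_true, Bool.and_false, Bool.false_eq_true, if_false]
      exact ih _ _ _ h
    · by_cases hf : flag = true
      · have hne : line ≠ l := fun e => by rw [e] at hc; exact hc h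
        simp only [hf, Bool.not_eq_true] at *
        simp only [hc, Bool.not_false, Bool.and_self, if_true]
        rw [ih _ _ _ (by simp [PySem.Dict.contains_insert, h])]
        exact PySem.Dict.get?_insert_of_ne d i hne.symm
      · simp only [Bool.not_eq_true] at hf
        simp only [hf, Bool.false_and, Bool.false_eq_true, if_false]
        exact ih _ _ _ h

-- seen-set dedup = first-occurrence-dict comprehension
theorem pfDedup_eq_select (pairs : List (String × Bool)) :
    ∀ (seen : PySem.Set String) (d : PySem.Dict String Int) (i : Int),
      (∀ l, d.contains l = PySem.Set.contains seen l) →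
      (∀ l j, d.get? l = some j → j < i) →
      pfDedup seen pairs = pfSelect (pfFirst i d pairs) i pairs := by
  induction pairs with
  | nil => intro seen d i _ _; rfl
  | cons p rest ih =>
    intro seen d i h1 h2
    obtain ⟨line, flag⟩ := p
    by_cases hf : flag = true
    · subst hf
      by_cases hs : PySem.Set.contains seen line = true
      · have hd : d.contains line = true := by rw [h1 line]; exact hs
        have hstep : pfFirst i d ((line, true) :: rest) = pfFirst (i + 1) d rest := by
          simp [pfFirst, hd]
        have hsome : ∃ j, d.get? line = some j := by
          have h' := hd
          rw [PySem.Dict.contains_eq_isSome_get?] at h'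
          exact Option.isSome_iff_exists.mp h'
        obtain ⟨j, hj⟩ := hsome
        have hjlt : j < i := h2 line j hj
        have hne : ((pfFirst (i + 1) d rest).getD line (-1) == i) = false := by
          rw [PySem.Dict.getD_eq_get?_getD,
            pfFirst_get?_of_contains rest (i + 1) d line hd, hj]
          simp only [Option.getD_some, beq_eq_false_iff_ne, ne_eq]
          omega
        have h2' : ∀ l j, d.get? l = some j → j < i + 1 := fun l j h => by
          have := h2 l j h; omega
        by_cases hb : (PySem.Str.strip line == "") = true
        · have hadd : PySem.Set.add seen line = seen := by
            unfold PySem.Set.add; rw [hs]; simp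
          simp only [pfDedup, pfSelect, hs, hb, hne, Bool.not_true, Bool.false_or,
            Bool.or_false, if_true, hadd, hstep]
          rw [ih seen d (i + 1) h1 h2']
        · have hbf : (PySem.Str.strip line == "") = false := by simpa using hb
          simp only [pfDedup, pfSelect, hs, hbf, hne, Bool.not_true,
            Bool.or_false, hstep]
          rw [ih seen d (i + 1) h1 h2']
          simp
      · have hsf : PySem.Set.contains seen line = false := by simpa using hs
        have hd : d.contains line = false := by rw [h1 line]; exact hsf
        have hstep : pfFirst i d ((line, true) :: rest) =
            pfFirst (i + 1) (d.insert line i) rest := by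
          simp [pfFirst, hd]
        have hc' : (d.insert line i).contains line = true := by
          rw [PySem.Dict.contains_insert]; simp
        have heq : ((pfFirst (i + 1) (d.insert line i) rest).getD line (-1) == i) = true := by
          rw [PySem.Dict.getD_eq_get?_getD,
            pfFirst_get?_of_contains rest (i + 1) (d.insert line i) line hc',
            PySem.Dict.get?_insert_self]
          simp
        have h1' : ∀ l, (d.insert line i).contains l =
            PySem.Set.contains (PySem.Set.add seen line) l := by
          intro l
          rw [PySem.Dict.contains_insert]
          unfold PySem.Set.add
          rw [hsf]
          simp only [Bool.false_eq_true, if_false]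
          by_cases hl : l = line
          · subst hl; simp
          · rw [h1 l]
            simp [hl, PySem.Set.contains]
        have h2' : ∀ l j, (d.insert line i).get? l = some j → j < i + 1 := by
          intro l j h
          by_cases hl : l = line
          · subst hl; rw [PySem.Dict.get?_insert_self] at h
            cases h; omega
          · rw [PySem.Dict.get?_insert_of_ne d i hl] at h
            have := h2 l j h; omega
        simp only [pfDedup, pfSelect, hsf, heq, Bool.not_false, Bool.true_or,
          Bool.or_true, if_true, hstep]
        rw [ih (PySem.Set.add seen line) (d.insert line i) (i + 1) h1' h2']
    · have hff : flag = false := by simpa using hf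
      subst hff
      have hstep : pfFirst i d ((line, false) :: rest) = pfFirst (i + 1) d rest := by
        simp [pfFirst]
      have h2' : ∀ l j, d.get? l = some j → j < i + 1 := fun l j h => by
        have := h2 l j h; omega
      simp only [pfDedup, pfSelect, Bool.not_false, Bool.true_or, Bool.false_eq_true,
        if_true, if_false, hstep]
      rw [ih seen d (i + 1) h1 h2']

-- ===== VERDICT (by name: the statement is the Claim_ definition above) =====
theorem preamble_filter_spec : Claim_equal_preamble_filter := by
  intro lines _ _
  unfold Spec_preamble_filter preamble_filter preamble_filter_alt
  rw [pfLoopA_eq_dedup, List.nil_append]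
  exact pfDedup_eq_select _ _ _ 0 (by intro l; rfl) (by intro l j h; simp [PySem.Dict.get?_empty] at h)
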